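-- pv_equiv track=rewrite | github.com/jjoshua2/arc_agi | unsolved/2025-10-11T04-29-28Z/a64e4611_best1.py | transform
-- ===== SOURCE A (Python) =====
-- from collections import deque
--
-- def transform(grid_lst: list[list[int]]) -> list[list[int]]:
--     if not grid_lst or not grid_lst[0]:
--         return grid_lst
--     rows = len(grid_lst)
--     cols = len(grid_lst[0])
--     grid = grid_lst  # read-only reference to input values
--
--     visited = [[False]*cols for _ in range(rows)]
--     directions = [(-1,0),(1,0),(0,-1),(0,1)]
--
--     largest_comp = []
--     # Find all connected components of zeros (4-connected)
--     for r in range(rows):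
--         for c in range(cols):
--             if grid[r][c] == 0 and not visited[r][c]:
--                 q = deque()
--                 q.append((r,c))
--                 visited[r][c] = True
--                 comp = [(r,c)]
--                 while q:
--                     cr, cc = q.popleft()
--                     for dr, dc in directions:
--                         nr, nc = cr+dr, cc+dc
--                         if 0 <= nr < rows and 0 <= nc < cols and not visited[nr][nc] and grid[nr][nc] == 0:
--                             visited[nr][nc] = True
--                             q.append((nr,nc))
--                             comp.append((nr,nc))
--                 if len(comp) > len(largest_comp):
--                     largest_comp = comp
--
--     # If no zero component found, return copy of original
--     output = [row[:] for row in grid_lst]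
--     if not largest_comp:
--         return output
--
--     # Fill largest zero-component with green (color 3)
--     for (r,c) in largest_comp:
--         output[r][c] = 3
--
--     return output
-- ===== SOURCE B (Python) =====
-- def transform(grid_lst: list[list[int]]) -> list[list[int]]:
--     if not grid_lst or not grid_lst[0]:
--         return grid_lst
--     rows = len(grid_lst)
--     cols = len(grid_lst[0])
--     zeros = {(r, c) for r in range(rows) for c in range(cols) if grid_lst[r][c] == 0}
--     best = set()
--     seen = set()
--     for r in range(rows):
--         for c in range(cols):
--             if (r, c) in zeros and (r, c) not in seen:
--                 comp = {(r, c)}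
--                 while True:
--                     grown = comp | {n for (cr, cc) in comp
--                                     for n in ((cr - 1, cc), (cr + 1, cc), (cr, cc - 1), (cr, cc + 1))
--                                     if n in zeros}
--                     if len(grown) == len(comp):
--                         break
--                     comp = grown
--                 seen |= comp
--                 if len(comp) > len(best):
--                     best = comp
--     return [[3 if (r, c) in best else v for c, v in enumerate(row)]
--             for r, row in enumerate(grid_lst)]
-- ===== Notes on version B (the rewrite author's own statement) =====
-- stated objective: alternative
-- what changed: Replaces A's per-component BFS (deque + boolean visited matrix, mutating a copied grid) by a precomputed zeros set, per-component neighbourhood dilation iterated to a fixpoint with a seen set, and a pure enumerate-comprehension output.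
import Mathlib
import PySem

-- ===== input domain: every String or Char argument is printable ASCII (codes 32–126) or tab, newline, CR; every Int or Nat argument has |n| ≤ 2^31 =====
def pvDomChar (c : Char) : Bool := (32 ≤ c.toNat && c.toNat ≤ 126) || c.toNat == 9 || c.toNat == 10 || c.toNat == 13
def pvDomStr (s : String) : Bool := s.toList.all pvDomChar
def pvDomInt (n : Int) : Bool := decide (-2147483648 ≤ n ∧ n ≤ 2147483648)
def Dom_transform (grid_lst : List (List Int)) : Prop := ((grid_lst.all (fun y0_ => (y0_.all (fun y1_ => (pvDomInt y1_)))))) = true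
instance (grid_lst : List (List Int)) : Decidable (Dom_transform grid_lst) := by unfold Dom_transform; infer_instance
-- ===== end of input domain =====

-- B replaces A's per-component BFS (deque + boolean visited matrix) by a zeros-set with
-- neighbourhood-dilation to a fixpoint and a pure comprehension output (objective: alternative).

-- ===== PORT A =====
-- grid_lst[r][c]; in both ports every call is guarded by 0 ≤ r < rows, 0 ≤ c < cols,
-- so the getD defaults are never the value Python would have raised on (under Pre_).
def gget (g : List (List Int)) (r c : Int) : Int :=
  PySem.List.pyGetD (PySem.List.pyGetD g r []) c 0

def vget (vis : List (List Bool)) (r c : Int) : Bool :=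
  PySem.List.pyGetD (PySem.List.pyGetD vis r []) c false

def vset (vis : List (List Bool)) (r c : Int) : List (List Bool) :=
  PySem.List.pySetD vis r (PySem.List.pySetD (PySem.List.pyGetD vis r []) c true)

-- one direction (dr,dc) of the `for dr, dc in directions` body
def bfsTry (g : List (List Int)) (rows cols cr cc : Int)
    (st : List (List Bool) × List (Int × Int) × List (Int × Int)) (d : Int × Int) :
    List (List Bool) × List (Int × Int) × List (Int × Int) :=
  let nr := cr + d.1
  let nc := cc + d.2
  if 0 ≤ nr ∧ nr < rows ∧ 0 ≤ nc ∧ nc < cols ∧ vget st.1 nr nc = false ∧ gget g nr nc = 0 then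
    (vset st.1 nr nc, st.2.1 ++ [(nr, nc)], st.2.2 ++ [(nr, nc)])
  else st

def bfsStep (g : List (List Int)) (rows cols cr cc : Int)
    (st : List (List Bool) × List (Int × Int) × List (Int × Int)) :
    List (List Bool) × List (Int × Int) × List (Int × Int) :=
  [((-1 : Int), (0 : Int)), (1, 0), (0, -1), (0, 1)].foldl (bfsTry g rows cols cr cc) st

-- the `while q:` loop; fuel rows*cols+1 is proved sufficient below
def bfsLoop (g : List (List Int)) (rows cols : Int) :
    Nat → List (List Bool) → List (Int × Int) → List (Int × Int) →
    List (List Bool) × List (Int × Int)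
  | 0, vis, _, comp => (vis, comp)
  | fuel + 1, vis, q, comp =>
    match q with
    | [] => (vis, comp)
    | (cr, cc) :: qrest =>
      let s := bfsStep g rows cols cr cc (vis, qrest, comp)
      bfsLoop g rows cols fuel s.1 s.2.1 s.2.2

-- body of the double `for r … for c …` scan: state = (visited, largest_comp)
def scanCell (g : List (List Int)) (rows cols : Int)
    (st : List (List Bool) × List (Int × Int)) (r c : Int) :
    List (List Bool) × List (Int × Int) :=
  if gget g r c = 0 ∧ vget st.1 r c = false then
    let res := bfsLoop g rows cols (rows.toNat * cols.toNat + 1) (vset st.1 r c) [(r, c)] [(r, c)]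
    if res.2.length > st.2.length then (res.1, res.2) else (res.1, st.2)
  else st

def set2d (out : List (List Int)) (r c v : Int) : List (List Int) :=
  PySem.List.pySetD out r (PySem.List.pySetD (PySem.List.pyGetD out r []) c v)

def transform (grid_lst : List (List Int)) : List (List Int) :=
  if grid_lst = [] ∨ grid_lst.headD [] = [] then grid_lst
  else
    let rows : Int := grid_lst.length
    let cols : Int := (grid_lst.headD []).length
    let init : List (List Bool) :=
      List.replicate grid_lst.length (List.replicate (grid_lst.headD []).length false)
    let fin := (PySem.List.pyRange 0 rows 1).foldl (fun st r =>
      (PySem.List.pyRange 0 cols 1).foldl (fun st c => scanCell grid_lst rows cols st r c) st)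
      (init, [])
    let output := grid_lst   -- row[:] copies: same values
    if fin.2 = [] then output
    else fin.2.foldl (fun out p => set2d out p.1 p.2 3) output

-- ===== PORT B =====
def zerosOf (g : List (List Int)) (rows cols : Int) : PySem.Set (Int × Int) :=
  PySem.Set.ofList ((PySem.List.pyRange 0 rows 1).flatMap (fun r =>
    ((PySem.List.pyRange 0 cols 1).filter (fun c => gget g r c == 0)).map (fun c => (r, c))))

def grow (zeros comp : PySem.Set (Int × Int)) : PySem.Set (Int × Int) :=
  PySem.Set.union comp (PySem.Set.ofList (comp.flatMap (fun p =>
    [(p.1 - 1, p.2), (p.1 + 1, p.2), (p.1, p.2 - 1), (p.1, p.2 + 1)].filter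
      (fun n => PySem.Set.contains zeros n))))

-- the `while True:` dilation loop; fuel rows*cols+1 is proved sufficient below
def dilate (zeros : PySem.Set (Int × Int)) : Nat → PySem.Set (Int × Int) → PySem.Set (Int × Int)
  | 0, comp => comp
  | fuel + 1, comp =>
    let grown := grow zeros comp
    if grown.length = comp.length then comp else dilate zeros fuel grown

-- body of the double scan: state = (seen, best)
def scanCellB (zeros : PySem.Set (Int × Int)) (fuel : Nat)
    (st : PySem.Set (Int × Int) × PySem.Set (Int × Int)) (r c : Int) :
    PySem.Set (Int × Int) × PySem.Set (Int × Int) :=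
  if (r, c) ∈ zeros ∧ (r, c) ∉ st.1 then
    let comp := dilate zeros fuel [(r, c)]
    (PySem.Set.update st.1 comp, if comp.length > st.2.length then comp else st.2)
  else st

def transform_alt (grid_lst : List (List Int)) : List (List Int) :=
  if grid_lst = [] ∨ grid_lst.headD [] = [] then grid_lst
  else
    let rows : Int := grid_lst.length
    let cols : Int := (grid_lst.headD []).length
    let zeros := zerosOf grid_lst rows cols
    let fin := (PySem.List.pyRange 0 rows 1).foldl (fun st r =>
      (PySem.List.pyRange 0 cols 1).foldl (fun st c =>
        scanCellB zeros (rows.toNat * cols.toNat + 1) st r c) st)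
      (PySem.Set.empty, PySem.Set.empty)
    (PySem.List.enumerate grid_lst 0).map (fun rrow =>
      (PySem.List.enumerate rrow.2 0).map (fun cv =>
        if (rrow.1, cv.1) ∈ fin.2 then 3 else cv.2))

-- ===== PRECONDITION & SPEC =====
-- Pre_ excludes exactly the inputs where A raises IndexError: a nonempty grid with a nonempty
-- first row and some later row shorter than it (A indexes every column of the first row's width).
def Pre_transform (grid_lst : List (List Int)) : Prop :=
  grid_lst = [] ∨ grid_lst.headD [] = [] ∨
    ∀ row ∈ grid_lst, (grid_lst.headD []).length ≤ row.length
instance (grid_lst : List (List Int)) : Decidable (Pre_transform grid_lst) := by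
  unfold Pre_transform; infer_instance

def pvWitness_transform : List (List Int) := [[0, 1, 0], [0, 5, 0], [1, 0, 0]]

def Spec_transform (grid_lst : List (List Int)) (out : List (List Int)) : Prop := out = transform_alt grid_lst
instance (grid_lst : List (List Int)) (out : List (List Int)) : Decidable (Spec_transform grid_lst out) := by unfold Spec_transform; infer_instance

-- ===== CLAIM (what is proved, stated in full; the proofs are below) =====
def Claim_equal_transform : Prop := ∀ (grid_lst : List (List Int)), Dom_transform grid_lst → Pre_transform grid_lst → Spec_transform grid_lst (transform grid_lst)

-- ===== LEMMAS AND PROOFS =====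


def RI (g : List (List Int)) : Int := (g.length : Int)
def CI (g : List (List Int)) : Int := ((g.headD []).length : Int)

def InB (g : List (List Int)) (r c : Int) : Prop :=
  0 ≤ r ∧ r < RI g ∧ 0 ≤ c ∧ c < CI g

def ZeroC (g : List (List Int)) (p : Int × Int) : Prop :=
  InB g p.1 p.2 ∧ gget g p.1 p.2 = 0

def AdjC (p q : Int × Int) : Prop :=
  q = (p.1 - 1, p.2) ∨ q = (p.1 + 1, p.2) ∨ q = (p.1, p.2 - 1) ∨ q = (p.1, p.2 + 1)

def StepC (g : List (List Int)) (p q : Int × Int) : Prop := ZeroC g p ∧ ZeroC g q ∧ AdjC p q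

def ReachC (g : List (List Int)) (s p : Int × Int) : Prop := Relation.ReflTransGen (StepC g) s p

lemma adjC_symm {p q : Int × Int} (h : AdjC p q) : AdjC q p := by
  rcases p with ⟨a, b⟩; rcases q with ⟨x, y⟩
  simp only [AdjC, Prod.mk.injEq] at h ⊢; omega

lemma stepC_symm {g : List (List Int)} {p q : Int × Int} (h : StepC g p q) : StepC g q p :=
  ⟨h.2.1, h.1, adjC_symm h.2.2⟩

lemma reachC_symm {g : List (List Int)} {s p : Int × Int} (h : ReachC g s p) : ReachC g p s :=
  (Relation.ReflTransGen.symmetric (fun _ _ hh => stepC_symm hh)) h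

lemma reachC_step {g : List (List Int)} {s p q : Int × Int} (h : ReachC g s p)
    (hs : StepC g p q) : ReachC g s q := h.tail hs

lemma reachC_zero {g : List (List Int)} {s p : Int × Int} (hz : ZeroC g s)
    (h : ReachC g s p) : ZeroC g p := by
  induction h with
  | refl => exact hz
  | tail _ hstep ih => exact hstep.2.1

-- a closed set not containing s contains nothing reachable from s
lemma reach_avoid {g : List (List Int)} {V : List (Int × Int)}
    (hcl : ∀ p ∈ V, ∀ n, StepC g p n → n ∈ V) {s p : Int × Int}
    (hs : s ∉ V) (h : ReachC g s p) : p ∉ V := by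
  intro hp
  have hrev : ReachC g p s := reachC_symm h
  have : s ∈ V := by
    clear h hs
    induction hrev with
    | refl => exact hp
    | tail _ hstep ih => exact hcl _ ih _ hstep
  exact hs this

-- closed set containing s contains everything reachable from s
lemma reach_subset_closed {g : List (List Int)} {S : List (Int × Int)}
    (hcl : ∀ p ∈ S, ∀ n, StepC g p n → n ∈ S) {s p : Int × Int}
    (hs : s ∈ S) (h : ReachC g s p) : p ∈ S := by
  induction h with
  | refl => exact hs
  | tail _ hstep ih => exact hcl _ ih _ hstep

-- length of a nodup list of in-bounds cells is at most rows*cols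
lemma length_le_RC {g : List (List Int)} {L : List (Int × Int)}
    (hz : ∀ p ∈ L, ZeroC g p) (hnd : L.Nodup) :
    L.length ≤ g.length * (g.headD []).length := by
  classical
  have h1 : L.length = L.toFinset.card := (List.toFinset_card_of_nodup hnd).symm
  have h2 : L.toFinset ⊆ (Finset.Ico (0:Int) (RI g)) ×ˢ (Finset.Ico (0:Int) (CI g)) := by
    intro p hp
    have := hz p (List.mem_toFinset.mp hp)
    rcases this with ⟨⟨h0, h1, h2, h3⟩, _⟩
    simp only [Finset.mem_product, Finset.mem_Ico]
    exact ⟨⟨h0, h1⟩, ⟨h2, h3⟩⟩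
  have h3 := Finset.card_le_card h2
  rw [Finset.card_product] at h3
  simp only [Int.card_Ico] at h3
  simp only [RI, CI, Int.sub_zero, Int.toNat_natCast] at h3
  omega

lemma nodup_mem_eq_length {α : Type} {l₁ l₂ : List α}
    (h₁ : l₁.Nodup) (h₂ : l₂.Nodup) (h : ∀ x, x ∈ l₁ ↔ x ∈ l₂) : l₁.length = l₂.length := by
  have p1 : l₁.Subperm l₂ := List.subperm_of_subset h₁ (fun x hx => (h x).mp hx)
  have p2 : l₂.Subperm l₁ := List.subperm_of_subset h₂ (fun x hx => (h x).mpr hx)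
  exact Nat.le_antisymm p1.length_le p2.length_le

lemma subset_nodup_len_mem {α : Type} {l₁ l₂ : List α}
    (h₁ : l₁.Nodup) (_h₂ : l₂.Nodup) (hsub : ∀ x ∈ l₁, x ∈ l₂)
    (hlen : l₂.length ≤ l₁.length) : ∀ x, x ∈ l₂ ↔ x ∈ l₁ := by
  have p1 : l₁.Subperm l₂ := List.subperm_of_subset h₁ hsub
  have : l₁.Perm l₂ := p1.perm_of_length_le hlen
  intro x; exact (this.mem_iff).symm

def MWF (g : List (List Int)) (vis : List (List Bool)) : Prop :=
  vis.length = g.length ∧ ∀ row ∈ vis, row.length = (g.headD []).length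

lemma mwf_init (g : List (List Int)) :
    MWF g (List.replicate g.length (List.replicate (g.headD []).length false)) := by
  constructor
  · simp
  · intro row hrow
    rw [List.eq_of_mem_replicate hrow]; simp

lemma mwf_vset {g : List (List Int)} {vis : List (List Bool)} (h : MWF g vis) {r c : Int}
    (hr : 0 ≤ r) (hrlt : r < RI g) : MWF g (vset vis r c) := by
  obtain ⟨h1, h2⟩ := h
  constructor
  · rw [vset, PySem.List.length_pySetD]; exact h1
  · intro row hrow
    rw [vset, PySem.List.pySetD_of_nonneg _ _ hr] at hrow
    rcases List.mem_or_eq_of_mem_set hrow with hmem | heq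
    · exact h2 _ hmem
    · subst heq
      rw [PySem.List.length_pySetD, PySem.List.pyGetD_of_nonneg _ _ hr]
      have hlt : r.toNat < vis.length := by rw [h1]; simp only [RI] at hrlt; omega
      rw [List.getD_eq_getElem _ _ hlt]
      exact h2 _ (List.getElem_mem hlt)

lemma vget_vset {g : List (List Int)} {vis : List (List Bool)} (h : MWF g vis)
    {r c r' c' : Int} (hb : InB g r c) (hb' : InB g r' c') :
    vget (vset vis r c) r' c' = if (r', c') = (r, c) then true else vget vis r' c' := by
  obtain ⟨h1, h2⟩ := h
  obtain ⟨hr0, hr1, hc0, hc1⟩ := hb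
  obtain ⟨hr0', hr1', hc0', hc1'⟩ := hb'
  have er : r = (r.toNat : Int) := (Int.toNat_of_nonneg hr0).symm
  have ec : c = (c.toNat : Int) := (Int.toNat_of_nonneg hc0).symm
  have er' : r' = (r'.toNat : Int) := (Int.toNat_of_nonneg hr0').symm
  have ec' : c' = (c'.toNat : Int) := (Int.toNat_of_nonneg hc0').symm
  have hrl : r.toNat < vis.length := by simp only [RI] at hr1; omega
  have hrow : ∀ rr : Int, 0 ≤ rr → rr < RI g → (PySem.List.pyGetD vis rr []).length = (g.headD []).length := by
    intro rr hrr0 hrr1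
    have hl : rr.toNat < vis.length := by simp only [RI] at hrr1; omega
    rw [PySem.List.pyGetD_of_nonneg _ _ hrr0, List.getD_eq_getElem _ _ hl]
    exact h2 _ (List.getElem_mem hl)
  rw [vget, vset]
  rw [er, er', ec']
  rw [PySem.List.pyGetD_pySetD_natCast _ _ _ _ _ hrl]
  by_cases hre : r'.toNat = r.toNat
  · rw [if_pos hre]
    have hcl : c.toNat < (PySem.List.pyGetD vis ((r.toNat : Int)) []).length := by
      rw [← er, hrow r hr0 hr1]; simp only [CI] at hc1; omega
    rw [ec, PySem.List.pyGetD_pySetD_natCast _ _ _ _ _ hcl]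
    split_ifs with hce hpair hpair
    · rfl
    · exact absurd (by rw [hre, hce]) hpair
    · simp only [Prod.mk.injEq, Int.natCast_inj] at hpair; omega
    · rw [vget, hre]
  · rw [if_neg hre]
    split_ifs with hpair
    · simp only [Prod.mk.injEq, Int.natCast_inj] at hpair; omega
    · rw [vget]

lemma vget_init {g : List (List Int)} {r c : Int} (hb : InB g r c) :
    vget (List.replicate g.length (List.replicate (g.headD []).length false)) r c = false := by
  obtain ⟨hr0, hr1, hc0, hc1⟩ := hb
  have hrl : r.toNat < g.length := by simp only [RI] at hr1; omega
  rw [vget, PySem.List.pyGetD_of_nonneg _ _ hr0, PySem.List.pyGetD_of_nonneg _ _ hc0]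
  have hcl : c.toNat < (g.head?.getD []).length := by
    simp only [CI, List.headD_eq_head?_getD] at hc1; omega
  simp [List.getD_eq_getElem?_getD, hrl, hcl]



lemma mem_zerosOf (g : List (List Int)) (p : Int × Int) :
    p ∈ zerosOf g (RI g) (CI g) ↔ ZeroC g p := by
  rw [zerosOf, PySem.Set.mem_ofList]
  simp only [List.mem_flatMap, List.mem_map, List.mem_filter, PySem.List.mem_pyRange_one,
    beq_iff_eq]
  constructor
  · rintro ⟨r, hr, c, ⟨hc, hg⟩, rfl⟩
    exact ⟨⟨hr.1, hr.2, hc.1, hc.2⟩, hg⟩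
  · rintro ⟨⟨h0, h1, h2, h3⟩, hg⟩
    exact ⟨p.1, ⟨h0, h1⟩, p.2, ⟨⟨h2, h3⟩, hg⟩, rfl⟩

lemma mem_grow {g : List (List Int)} {comp : PySem.Set (Int × Int)}
    (hz : ∀ p ∈ comp, ZeroC g p) (q : Int × Int) :
    q ∈ grow (zerosOf g (RI g) (CI g)) comp ↔ q ∈ comp ∨ ∃ p ∈ comp, StepC g p q := by
  rw [grow, PySem.Set.mem_union, PySem.Set.mem_ofList]
  simp only [List.mem_flatMap, List.mem_filter]
  apply or_congr Iff.rfl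
  constructor
  · rintro ⟨p, hp, hcand, hcont⟩
    have hq : ZeroC g q := (mem_zerosOf g q).mp ((PySem.Set.contains_iff _ _).mp hcont)
    refine ⟨p, hp, hz p hp, hq, ?_⟩
    simp only [List.mem_cons, List.not_mem_nil, or_false] at hcand
    rcases hcand with h | h | h | h <;> simp [AdjC, h]
  · rintro ⟨p, hp, hzp, hzq, hadj⟩
    refine ⟨p, hp, ?_, (PySem.Set.contains_iff _ _).mpr ((mem_zerosOf g q).mpr hzq)⟩
    rcases hadj with h | h | h | h <;> simp [h]

lemma nodup_grow {zeros comp : PySem.Set (Int × Int)} (hnd : comp.Nodup) :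
    (grow zeros comp).Nodup := PySem.Set.nodup_union _ _ hnd

lemma dilate_spec (g : List (List Int)) (seed : Int × Int) :
    ∀ (fuel : Nat) (comp : PySem.Set (Int × Int)),
    comp.Nodup → seed ∈ comp → (∀ p ∈ comp, ZeroC g p) → (∀ p ∈ comp, ReachC g seed p) →
    g.length * (g.headD []).length + 1 ≤ fuel + comp.length →
    (∀ p, p ∈ dilate (zerosOf g (RI g) (CI g)) fuel comp ↔ ReachC g seed p) ∧
      (dilate (zerosOf g (RI g) (CI g)) fuel comp).Nodup := by
  intro fuel
  induction fuel with
  | zero =>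
    intro comp hnd hs hz hr hfuel
    exfalso
    have := length_le_RC hz hnd
    omega
  | succ n ih =>
    intro comp hnd hs hz hr hfuel
    have hgnd : (grow (zerosOf g (RI g) (CI g)) comp).Nodup := nodup_grow hnd
    have hsub : ∀ x ∈ comp, x ∈ grow (zerosOf g (RI g) (CI g)) comp :=
      fun x hx => (mem_grow hz x).mpr (Or.inl hx)
    have hunf : dilate (zerosOf g (RI g) (CI g)) (n + 1) comp =
        (if (grow (zerosOf g (RI g) (CI g)) comp).length = comp.length then comp
         else dilate (zerosOf g (RI g) (CI g)) n (grow (zerosOf g (RI g) (CI g)) comp)) := rfl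
    rw [hunf]
    by_cases hlen : (grow (zerosOf g (RI g) (CI g)) comp).length = comp.length
    · rw [if_pos hlen]
      have hmem : ∀ x, x ∈ grow (zerosOf g (RI g) (CI g)) comp ↔ x ∈ comp :=
        subset_nodup_len_mem hnd hgnd hsub (le_of_eq hlen)
      have hcl : ∀ p ∈ comp, ∀ nn, StepC g p nn → nn ∈ comp :=
        fun p hp nn hst => (hmem nn).mp ((mem_grow hz nn).mpr (Or.inr ⟨p, hp, hst⟩))
      exact ⟨fun p => ⟨fun hp => hr p hp, fun hp => reach_subset_closed hcl hs hp⟩, hnd⟩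
    · rw [if_neg hlen]
      have hgrow : comp.length + 1 ≤ (grow (zerosOf g (RI g) (CI g)) comp).length := by
        have := (List.subperm_of_subset hnd hsub).length_le
        omega
      refine ih (grow (zerosOf g (RI g) (CI g)) comp) hgnd (hsub seed hs) ?_ ?_ (by omega)
      · intro p hp
        rcases (mem_grow hz p).mp hp with h | ⟨pp, _, hst⟩
        · exact hz p h
        · exact hst.2.1
      · intro p hp
        rcases (mem_grow hz p).mp hp with h | ⟨pp, hpp, hst⟩
        · exact hr p h
        · exact reachC_step (hr pp hpp) hst

lemma dilate_component (g : List (List Int)) (seed : Int × Int) (hz : ZeroC g seed) :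
    (∀ p, p ∈ dilate (zerosOf g (RI g) (CI g)) (g.length * (g.headD []).length + 1) [seed] ↔
      ReachC g seed p) ∧
    (dilate (zerosOf g (RI g) (CI g)) (g.length * (g.headD []).length + 1) [seed]).Nodup := by
  apply dilate_spec g seed _ [seed] (by simp) (by simp)
  · intro p hp; rw [List.mem_singleton] at hp; subst hp; exact hz
  · intro p hp; rw [List.mem_singleton] at hp; subst hp; exact Relation.ReflTransGen.refl
  · simp


structure BInv (g : List (List Int)) (V0 : List (Int × Int)) (seed : Int × Int)
    (vis : List (List Bool)) (q comp : List (Int × Int)) : Prop where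
  wf : MWF g vis
  rep : ∀ r c, InB g r c → (vget vis r c = true ↔ ((r, c) ∈ V0 ∨ (r, c) ∈ comp))
  ndc : comp.Nodup
  ndq : q.Nodup
  qs : ∀ p ∈ q, p ∈ comp
  zc : ∀ p ∈ comp, ZeroC g p
  rc : ∀ p ∈ comp, ReachC g seed p
  dv : ∀ p ∈ comp, p ∉ V0
  sin : seed ∈ comp
  fr : ∀ p ∈ comp, p ∉ q → ∀ n, StepC g p n → vget vis n.1 n.2 = true

structure MInv (g : List (List Int)) (V0 : List (Int × Int)) (seed hd : Int × Int)
    (vis : List (List Bool)) (q comp : List (Int × Int)) : Prop where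
  wf : MWF g vis
  rep : ∀ r c, InB g r c → (vget vis r c = true ↔ ((r, c) ∈ V0 ∨ (r, c) ∈ comp))
  ndc : comp.Nodup
  ndq : q.Nodup
  qs : ∀ p ∈ q, p ∈ comp
  zc : ∀ p ∈ comp, ZeroC g p
  rc : ∀ p ∈ comp, ReachC g seed p
  dv : ∀ p ∈ comp, p ∉ V0
  sin : seed ∈ comp
  hin : hd ∈ comp
  hnq : hd ∉ q
  fr : ∀ p ∈ comp, p ∉ q → p ≠ hd → ∀ n, StepC g p n → vget vis n.1 n.2 = true

lemma zeroC_inB {g : List (List Int)} {p : Int × Int} (h : ZeroC g p) : InB g p.1 p.2 := h.1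

lemma bfsTry_spec {g : List (List Int)} {V0 : List (Int × Int)} {seed hd : Int × Int}
    {vis : List (List Bool)} {q comp : List (Int × Int)} (d : Int × Int)
    (hM : MInv g V0 seed hd vis q comp)
    (hadj : AdjC hd (hd.1 + d.1, hd.2 + d.2)) :
    ∃ (vis' : List (List Bool)) (new : List (Int × Int)),
      bfsTry g (RI g) (CI g) hd.1 hd.2 (vis, q, comp) d = (vis', q ++ new, comp ++ new) ∧
      MInv g V0 seed hd vis' (q ++ new) (comp ++ new) ∧
      (∀ r c, InB g r c → vget vis r c = true → vget vis' r c = true) ∧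
      (ZeroC g (hd.1 + d.1, hd.2 + d.2) → vget vis' (hd.1 + d.1) (hd.2 + d.2) = true) := by
  rw [bfsTry]
  set n : Int × Int := (hd.1 + d.1, hd.2 + d.2) with hn
  by_cases hg : 0 ≤ hd.1 + d.1 ∧ hd.1 + d.1 < RI g ∧ 0 ≤ hd.2 + d.2 ∧ hd.2 + d.2 < CI g ∧
      vget vis (hd.1 + d.1) (hd.2 + d.2) = false ∧ gget g (hd.1 + d.1) (hd.2 + d.2) = 0
  · obtain ⟨h1, h2, h3, h4, hv, hz0⟩ := hg
    have hbn : InB g n.1 n.2 := ⟨h1, h2, h3, h4⟩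
    have hzn : ZeroC g n := ⟨hbn, hz0⟩
    have hnotin : (n ∈ V0 ∨ n ∈ comp) → False := by
      intro hmem
      have := (hM.rep n.1 n.2 hbn).mpr hmem
      rw [hv] at this; exact absurd this (by simp)
    have hnV0 : n ∉ V0 := fun hh => hnotin (Or.inl hh)
    have hnC : n ∉ comp := fun hh => hnotin (Or.inr hh)
    have hnQ : n ∉ q := fun hh => hnC (hM.qs n hh)
    have hstep : StepC g hd n := ⟨hM.zc hd hM.hin, hzn, hadj⟩
    refine ⟨vset vis n.1 n.2, [n], ?_, ?_, ?_, ?_⟩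
    · rw [if_pos ⟨h1, h2, h3, h4, hv, hz0⟩]
    · constructor
      · exact mwf_vset hM.wf h1 h2
      · intro r c hb
        rw [vget_vset hM.wf hbn hb]
        by_cases he : (r, c) = (n.1, n.2)
        · rw [if_pos he]
          have : (r, c) = n := by rw [he]
          simp [this]
        · rw [if_neg he, hM.rep r c hb]
          have hne : (r, c) ≠ n := fun hh => he (by rw [hh])
          simp only [List.mem_append, List.mem_singleton]
          constructor
          · rintro (hh | hh)
            · exact Or.inl hh
            · exact Or.inr (Or.inl hh)
          · rintro (hh | hh | hh)
            · exact Or.inl hh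
            · exact Or.inr hh
            · exact absurd hh hne
      · simp only [List.nodup_append, List.nodup_singleton, true_and]
        refine ⟨hM.ndc, fun p hp x hx => ?_⟩
        rw [List.mem_singleton] at hx; subst hx
        exact fun he => hnC (he ▸ hp)
      · simp only [List.nodup_append, List.nodup_singleton, true_and]
        refine ⟨hM.ndq, fun p hp x hx => ?_⟩
        rw [List.mem_singleton] at hx; subst hx
        exact fun he => hnQ (he ▸ hp)
      · intro p hp
        rcases List.mem_append.mp hp with hh | hh
        · exact List.mem_append.mpr (Or.inl (hM.qs p hh))
        · exact List.mem_append.mpr (Or.inr hh)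
      · intro p hp
        rcases List.mem_append.mp hp with hh | hh
        · exact hM.zc p hh
        · rw [List.mem_singleton] at hh; subst hh; exact hzn
      · intro p hp
        rcases List.mem_append.mp hp with hh | hh
        · exact hM.rc p hh
        · rw [List.mem_singleton] at hh; subst hh
          exact reachC_step (hM.rc hd hM.hin) hstep
      · intro p hp
        rcases List.mem_append.mp hp with hh | hh
        · exact hM.dv p hh
        · rw [List.mem_singleton] at hh; subst hh; exact hnV0
      · exact List.mem_append.mpr (Or.inl hM.sin)
      · exact List.mem_append.mpr (Or.inl hM.hin)
      · intro hh
        rcases List.mem_append.mp hh with hh | hh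
        · exact hM.hnq hh
        · rw [List.mem_singleton] at hh; exact hnC (hh ▸ hM.hin)
      · intro p hp hpq hphd nn hstepn
        have hpc : p ∈ comp := by
          rcases List.mem_append.mp hp with hh | hh
          · exact hh
          · exfalso; exact hpq (List.mem_append.mpr (Or.inr hh))
        have hpnq : p ∉ q := fun hh => hpq (List.mem_append.mpr (Or.inl hh))
        have hv' := hM.fr p hpc hpnq hphd nn hstepn
        have hbnn : InB g nn.1 nn.2 := zeroC_inB hstepn.2.1
        rw [vget_vset hM.wf hbn hbnn]
        split_ifs with he
        · rfl
        · exact hv'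
    · intro r c hb hv'
      rw [vget_vset hM.wf hbn hb]
      split_ifs with he
      · rfl
      · exact hv'
    · intro _
      have := vget_vset (g := g) hM.wf hbn hbn
      rw [this, if_pos rfl]
  · refine ⟨vis, [], ?_, ?_, fun _ _ _ hh => hh, ?_⟩
    · rw [if_neg hg]; simp
    · simpa using hM
    · intro hzn
      obtain ⟨⟨h1, h2, h3, h4⟩, hz0⟩ := hzn
      by_cases hv : vget vis (hd.1 + d.1) (hd.2 + d.2) = false
      · exact absurd ⟨h1, h2, h3, h4, hv, hz0⟩ hg
      · simpa using hv

lemma bfsStep_spec {g : List (List Int)} {V0 : List (Int × Int)} {seed hd : Int × Int}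
    {vis : List (List Bool)} {q comp : List (Int × Int)}
    (hM : MInv g V0 seed hd vis q comp) :
    ∃ (vis' : List (List Bool)) (new : List (Int × Int)),
      bfsStep g (RI g) (CI g) hd.1 hd.2 (vis, q, comp) = (vis', q ++ new, comp ++ new) ∧
      BInv g V0 seed vis' (q ++ new) (comp ++ new) := by
  have ad1 : AdjC hd (hd.1 + (-1 : Int), hd.2 + (0 : Int)) := by
    left; rw [Prod.mk.injEq]; constructor <;> ring
  have ad2 : AdjC hd (hd.1 + (1 : Int), hd.2 + (0 : Int)) := by
    right; left; rw [Prod.mk.injEq]; constructor <;> ring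
  have ad3 : AdjC hd (hd.1 + (0 : Int), hd.2 + (-1 : Int)) := by
    right; right; left; rw [Prod.mk.injEq]; constructor <;> ring
  have ad4 : AdjC hd (hd.1 + (0 : Int), hd.2 + (1 : Int)) := by
    right; right; right; rw [Prod.mk.injEq]; constructor <;> ring
  obtain ⟨v1, n1, he1, hM1, mono1, mark1⟩ := bfsTry_spec ((-1 : Int), (0 : Int)) hM ad1
  obtain ⟨v2, n2, he2, hM2, mono2, mark2⟩ := bfsTry_spec ((1 : Int), (0 : Int)) hM1 ad2
  obtain ⟨v3, n3, he3, hM3, mono3, mark3⟩ := bfsTry_spec ((0 : Int), (-1 : Int)) hM2 ad3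
  obtain ⟨v4, n4, he4, hM4, mono4, mark4⟩ := bfsTry_spec ((0 : Int), (1 : Int)) hM3 ad4
  have hres : bfsStep g (RI g) (CI g) hd.1 hd.2 (vis, q, comp) =
      (v4, (((q ++ n1) ++ n2) ++ n3) ++ n4, (((comp ++ n1) ++ n2) ++ n3) ++ n4) := by
    rw [bfsStep]
    simp only [List.foldl_cons, List.foldl_nil]
    rw [he1, he2, he3, he4]
  refine ⟨v4, ((n1 ++ n2) ++ n3) ++ n4, ?_, ?_⟩
  · rw [hres]; simp [List.append_assoc]
  have hq4 : q ++ (((n1 ++ n2) ++ n3) ++ n4) = (((q ++ n1) ++ n2) ++ n3) ++ n4 := by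
    simp [List.append_assoc]
  have hc4 : comp ++ (((n1 ++ n2) ++ n3) ++ n4) = (((comp ++ n1) ++ n2) ++ n3) ++ n4 := by
    simp [List.append_assoc]
  rw [hq4, hc4]
  -- lift the four neighbour marks to the final matrix v4
  have lift2 : ∀ r c : Int, InB g r c → vget v2 r c = true → vget v4 r c = true :=
    fun r c hb hh => mono4 r c hb (mono3 r c hb hh)
  have lift1 : ∀ r c : Int, InB g r c → vget v1 r c = true → vget v4 r c = true :=
    fun r c hb hh => lift2 r c hb (mono2 r c hb hh)
  constructor
  · exact hM4.wf
  · exact hM4.rep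
  · exact hM4.ndc
  · exact hM4.ndq
  · exact hM4.qs
  · exact hM4.zc
  · exact hM4.rc
  · exact hM4.dv
  · exact hM4.sin
  · -- frontier
    intro p hp hpq nn hstepn
    by_cases hphd : p = hd
    · subst hphd
      have hzn : ZeroC g nn := hstepn.2.1
      have hbn : InB g nn.1 nn.2 := hzn.1
      rcases hstepn.2.2 with hcase | hcase | hcase | hcase
      · have he : (p.1 + (-1 : Int), p.2 + (0 : Int)) = nn := by
          rw [hcase]; rw [Prod.mk.injEq]; constructor <;> ring
        have := mark1 (he ▸ hzn)
        rw [show (p.1 + (-1 : Int)) = nn.1 from by rw [← he]] at this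
        rw [show (p.2 + (0 : Int)) = nn.2 from by rw [← he]] at this
        exact lift1 nn.1 nn.2 hbn this
      · have he : (p.1 + (1 : Int), p.2 + (0 : Int)) = nn := by
          rw [hcase]; rw [Prod.mk.injEq]; constructor <;> ring
        have := mark2 (he ▸ hzn)
        rw [show (p.1 + (1 : Int)) = nn.1 from by rw [← he]] at this
        rw [show (p.2 + (0 : Int)) = nn.2 from by rw [← he]] at this
        exact lift2 nn.1 nn.2 hbn this
      · have he : (p.1 + (0 : Int), p.2 + (-1 : Int)) = nn := by
          rw [hcase]; rw [Prod.mk.injEq]; constructor <;> ring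
        have := mark3 (he ▸ hzn)
        rw [show (p.1 + (0 : Int)) = nn.1 from by rw [← he]] at this
        rw [show (p.2 + (-1 : Int)) = nn.2 from by rw [← he]] at this
        exact mono4 nn.1 nn.2 hbn this
      · have he : (p.1 + (0 : Int), p.2 + (1 : Int)) = nn := by
          rw [hcase]; rw [Prod.mk.injEq]; constructor <;> ring
        have := mark4 (he ▸ hzn)
        rw [show (p.1 + (0 : Int)) = nn.1 from by rw [← he]] at this
        rw [show (p.2 + (1 : Int)) = nn.2 from by rw [← he]] at this
        exact this
    · exact hM4.fr p hp hpq hphd nn hstepn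

lemma bfsLoop_spec {g : List (List Int)} {V0 : List (Int × Int)} {seed : Int × Int} :
    ∀ (fuel : Nat) (vis : List (List Bool)) (q comp : List (Int × Int)),
    BInv g V0 seed vis q comp →
    q.length + (g.length * (g.headD []).length - comp.length) ≤ fuel →
    BInv g V0 seed (bfsLoop g (RI g) (CI g) fuel vis q comp).1 []
      (bfsLoop g (RI g) (CI g) fuel vis q comp).2 := by
  intro fuel
  induction fuel with
  | zero =>
    intro vis q comp hInv hfuel
    have hq : q = [] := by
      have := length_le_RC hInv.zc hInv.ndc
      have : q.length = 0 := by omega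
      exact List.length_eq_zero_iff.mp this
    subst hq
    exact hInv
  | succ n ih =>
    intro vis q comp hInv hfuel
    match q with
    | [] => exact hInv
    | (cr, cc) :: qrest =>
      have hndq := hInv.ndq
      rw [List.nodup_cons] at hndq
      have hM : MInv g V0 seed (cr, cc) vis qrest comp := by
        constructor
        · exact hInv.wf
        · exact hInv.rep
        · exact hInv.ndc
        · exact hndq.2
        · exact fun p hp => hInv.qs p (List.mem_cons_of_mem _ hp)
        · exact hInv.zc
        · exact hInv.rc
        · exact hInv.dv
        · exact hInv.sin
        · exact hInv.qs _ (List.mem_cons_self)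
        · exact hndq.1
        · intro p hp hpq hphd nn hstepn
          exact hInv.fr p hp (by simp [List.mem_cons, hphd, hpq]) nn hstepn
      obtain ⟨vis', new, heq, hInv'⟩ := bfsStep_spec hM
      have hloop : bfsLoop g (RI g) (CI g) (n + 1) vis ((cr, cc) :: qrest) comp =
          bfsLoop g (RI g) (CI g) n vis' (qrest ++ new) (comp ++ new) := by
        rw [bfsLoop]
        rw [show bfsStep g (RI g) (CI g) cr cc (vis, qrest, comp) =
          (vis', qrest ++ new, comp ++ new) from heq]
      rw [hloop]
      apply ih _ _ _ hInv'
      have hble : (comp ++ new).length ≤ g.length * (g.headD []).length :=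
        length_le_RC hInv'.zc hInv'.ndc
      simp only [List.length_append, List.length_cons] at *
      omega

lemma bfs_component (g : List (List Int)) (V0 : List (Int × Int)) (seed : Int × Int)
    (hcl : ∀ p ∈ V0, ∀ n, StepC g p n → n ∈ V0)
    (hz : ZeroC g seed) (hs : seed ∉ V0) (vis : List (List Bool)) (hwf : MWF g vis)
    (hrep : ∀ r c, InB g r c → (vget vis r c = true ↔ (r, c) ∈ V0)) :
    (∀ p, p ∈ (bfsLoop g (RI g) (CI g) (g.length * (g.headD []).length + 1)
        (vset vis seed.1 seed.2) [seed] [seed]).2 ↔ ReachC g seed p) ∧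
    (bfsLoop g (RI g) (CI g) (g.length * (g.headD []).length + 1)
        (vset vis seed.1 seed.2) [seed] [seed]).2.Nodup ∧
    MWF g (bfsLoop g (RI g) (CI g) (g.length * (g.headD []).length + 1)
        (vset vis seed.1 seed.2) [seed] [seed]).1 ∧
    (∀ r c, InB g r c → (vget (bfsLoop g (RI g) (CI g) (g.length * (g.headD []).length + 1)
        (vset vis seed.1 seed.2) [seed] [seed]).1 r c = true ↔
      ((r, c) ∈ V0 ∨ (r, c) ∈ (bfsLoop g (RI g) (CI g) (g.length * (g.headD []).length + 1)
        (vset vis seed.1 seed.2) [seed] [seed]).2))) := by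
  have hbseed : InB g seed.1 seed.2 := hz.1
  have hInit : BInv g V0 seed (vset vis seed.1 seed.2) [seed] [seed] := by
    constructor
    · exact mwf_vset hwf hbseed.1 hbseed.2.1
    · intro r c hb
      rw [vget_vset hwf ⟨hbseed.1, hbseed.2.1, hbseed.2.2.1, hbseed.2.2.2⟩ hb]
      split_ifs with he
      · have hps : (r, c) = seed := by
          have h2 : (r, c) = (seed.1, seed.2) := he
          rw [h2]
        simp [hps]
      · rw [hrep r c hb]
        have hne : (r, c) ≠ seed := fun hh => he (by rw [hh])
        simp [hne]
    · exact List.nodup_singleton _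
    · exact List.nodup_singleton _
    · exact fun p hp => hp
    · intro p hp; rw [List.mem_singleton] at hp; subst hp; exact hz
    · intro p hp; rw [List.mem_singleton] at hp; subst hp; exact Relation.ReflTransGen.refl
    · intro p hp; rw [List.mem_singleton] at hp; subst hp; exact hs
    · exact List.mem_singleton.mpr rfl
    · intro p hp hnp; exact absurd hp hnp
  have hRC : 1 ≤ g.length * (g.headD []).length := by
    have := length_le_RC hInit.zc hInit.ndc
    simpa using this
  have hfin := bfsLoop_spec (g.length * (g.headD []).length + 1)
    (vset vis seed.1 seed.2) [seed] [seed] hInit (by simp; omega)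
  refine ⟨?_, hfin.ndc, hfin.wf, hfin.rep⟩
  intro p
  constructor
  · exact fun hp => hfin.rc p hp
  · intro hp
    have hclosed : ∀ x ∈ (bfsLoop g (RI g) (CI g) (g.length * (g.headD []).length + 1)
        (vset vis seed.1 seed.2) [seed] [seed]).2, ∀ nn, StepC g x nn →
        nn ∈ (bfsLoop g (RI g) (CI g) (g.length * (g.headD []).length + 1)
        (vset vis seed.1 seed.2) [seed] [seed]).2 := by
      intro x hx nn hstep
      have hv := hfin.fr x hx (List.not_mem_nil) nn hstep
      have hbn : InB g nn.1 nn.2 := hstep.2.1.1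
      have := (hfin.rep nn.1 nn.2 hbn).mp hv
      rcases this with hh | hh
      · exfalso
        have hreach : ReachC g seed nn := reachC_step (hfin.rc x hx) hstep
        exact reach_avoid hcl hs hreach hh
      · exact hh
    exact reach_subset_closed hclosed hfin.sin hp

structure ScanRel (g : List (List Int))
    (a : List (List Bool) × List (Int × Int))
    (b : PySem.Set (Int × Int) × PySem.Set (Int × Int)) : Prop where
  wf : MWF g a.1
  rep : ∀ r c, InB g r c → (vget a.1 r c = true ↔ (r, c) ∈ b.1)
  cl : ∀ p ∈ b.1, ∀ n, StepC g p n → n ∈ b.1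
  seennd : b.1.Nodup
  lmem : ∀ p, p ∈ a.2 ↔ p ∈ b.2
  llen : a.2.length = b.2.length
  lnd : a.2.Nodup
  bnd : b.2.Nodup
  lz : ∀ p ∈ a.2, ZeroC g p

lemma scanRel_step {g : List (List Int)}
    {a : List (List Bool) × List (Int × Int)}
    {b : PySem.Set (Int × Int) × PySem.Set (Int × Int)}
    (hR : ScanRel g a b) {r c : Int} (hb : InB g r c) :
    ScanRel g (scanCell g (RI g) (CI g) a r c)
      (scanCellB (zerosOf g (RI g) (CI g)) ((RI g).toNat * (CI g).toNat + 1) b r c) := by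
  have hfuel : (RI g).toNat * (CI g).toNat + 1 = g.length * (g.headD []).length + 1 := by
    simp [RI, CI]
  have hguard : (gget g r c = 0 ∧ vget a.1 r c = false) ↔
      ((r, c) ∈ zerosOf g (RI g) (CI g) ∧ (r, c) ∉ b.1) := by
    rw [mem_zerosOf]
    constructor
    · rintro ⟨hg, hv⟩
      refine ⟨⟨hb, hg⟩, fun hmem => ?_⟩
      have := (hR.rep r c hb).mpr hmem
      rw [hv] at this; exact absurd this (by simp)
    · rintro ⟨⟨_, hg⟩, hnm⟩
      refine ⟨hg, ?_⟩
      rcases Bool.eq_false_or_eq_true (vget a.1 r c) with hh | hh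
      · exact absurd ((hR.rep r c hb).mp hh) hnm
      · exact hh
  simp only [scanCell, scanCellB]
  by_cases hA : gget g r c = 0 ∧ vget a.1 r c = false
  · have hB := hguard.mp hA
    rw [if_pos hA, if_pos hB]
    have hzseed : ZeroC g (r, c) := ⟨hb, hA.1⟩
    have hsV0 : (r, c) ∉ b.1 := hB.2
    obtain ⟨Amem, And, Awf, Arep⟩ :=
      bfs_component g b.1 (r, c) hR.cl hzseed hsV0 a.1 hR.wf hR.rep
    have Bres := dilate_component g (r, c) hzseed
    rw [hfuel]
    set resA := bfsLoop g (RI g) (CI g) (g.length * (g.headD []).length + 1)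
      (vset a.1 r c) [(r, c)] [(r, c)] with hresA
    set compB := dilate (zerosOf g (RI g) (CI g)) (g.length * (g.headD []).length + 1)
      [(r, c)] with hcompB
    obtain ⟨Bmem, Bnd⟩ := Bres
    clear_value resA compB
    have hAB : ∀ p, p ∈ resA.2 ↔ p ∈ compB := by
      intro p; rw [Amem p, Bmem p]
    have hlen : resA.2.length = compB.length := nodup_mem_eq_length And Bnd hAB
    have hcond : resA.2.length > a.2.length ↔ compB.length > b.2.length := by
      rw [hlen, hR.llen]
    have hAz : ∀ p ∈ resA.2, ZeroC g p :=
      fun p hp => reachC_zero hzseed ((Amem p).mp hp)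
    have hrep' : ∀ rr cc, InB g rr cc →
        (vget resA.1 rr cc = true ↔ (rr, cc) ∈ PySem.Set.update b.1 compB) := by
      intro rr cc hbb
      rw [Arep rr cc hbb, PySem.Set.mem_update]
      exact or_congr Iff.rfl (hAB (rr, cc))
    have hcl' : ∀ p ∈ PySem.Set.update b.1 compB, ∀ n, StepC g p n →
        n ∈ PySem.Set.update b.1 compB := by
      intro p hp n hstep
      rw [PySem.Set.mem_update] at hp ⊢
      rcases hp with hh | hh
      · exact Or.inl (hR.cl p hh n hstep)
      · exact Or.inr ((Bmem n).mpr (reachC_step ((Bmem p).mp hh) hstep))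
    by_cases hc : resA.2.length > a.2.length
    · rw [if_pos hc, if_pos (hcond.mp hc)]
      constructor
      · exact Awf
      · exact hrep'
      · exact hcl'
      · exact PySem.Set.nodup_update _ _ hR.seennd
      · exact hAB
      · exact hlen
      · exact And
      · exact Bnd
      · exact hAz
    · rw [if_neg hc, if_neg (fun hh => hc (hcond.mpr hh))]
      constructor
      · exact Awf
      · exact hrep'
      · exact hcl'
      · exact PySem.Set.nodup_update _ _ hR.seennd
      · exact hR.lmem
      · exact hR.llen
      · exact hR.lnd
      · exact hR.bnd
      · exact hR.lz
  · rw [if_neg hA, if_neg (fun hh => hA (hguard.mpr hh))]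
    exact hR

lemma foldl_rel {α β γ : Type} (R : α → β → Prop) (f : α → γ → α) (f' : β → γ → β) :
    ∀ (l : List γ), (∀ x ∈ l, ∀ a b, R a b → R (f a x) (f' b x)) →
    ∀ {a : α} {b : β}, R a b → R (l.foldl f a) (l.foldl f' b) := by
  intro l
  induction l with
  | nil => intro _ a b hab; exact hab
  | cons x xs ih =>
    intro h a b hab
    simp only [List.foldl_cons]
    exact ih (fun y hy => h y (List.mem_cons_of_mem _ hy)) (h x List.mem_cons_self a b hab)

lemma scan_all (g : List (List Int)) :
    ScanRel g
      ((PySem.List.pyRange 0 (RI g)).foldl (fun st r =>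
        (PySem.List.pyRange 0 (CI g)).foldl (fun st c => scanCell g (RI g) (CI g) st r c) st)
        (List.replicate g.length (List.replicate (g.headD []).length false), []))
      ((PySem.List.pyRange 0 (RI g)).foldl (fun st r =>
        (PySem.List.pyRange 0 (CI g)).foldl (fun st c =>
          scanCellB (zerosOf g (RI g) (CI g)) ((RI g).toNat * (CI g).toNat + 1) st r c) st)
        (PySem.Set.empty, PySem.Set.empty)) := by
  apply foldl_rel (ScanRel g)
  · intro r hr a b hab
    apply foldl_rel (ScanRel g)
    · intro c hc a' b' hab'
      rw [PySem.List.mem_pyRange_one] at hr hc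
      exact scanRel_step hab' ⟨hr.1, hr.2, hc.1, hc.2⟩
    · exact hab
  · constructor
    · exact mwf_init g
    · intro r c hb
      rw [vget_init hb]
      simp [PySem.Set.empty]
    · intro p hp; simp [PySem.Set.empty] at hp
    · simp [PySem.Set.empty]
    · intro p; simp [PySem.Set.empty]
    · simp [PySem.Set.empty]
    · simp
    · simp [PySem.Set.empty]
    · intro p hp; simp at hp

def val2 (out : List (List Int)) (i j : Nat) : Int := (out.getD i []).getD j 0

lemma length_set2d (out : List (List Int)) (r c v : Int) :
    (set2d out r c v).length = out.length := PySem.List.length_pySetD _ _ _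

lemma rowlen_set2d (out : List (List Int)) {r : Int} (c v : Int) (hr : 0 ≤ r) (i : Nat) :
    ((set2d out r c v).getD i []).length = (out.getD i []).length := by
  rw [set2d, PySem.List.pySetD_of_nonneg _ _ hr]
  by_cases hi : i = r.toNat
  · subst hi
    by_cases hlt : r.toNat < out.length
    · rw [List.getD_eq_getElem?_getD, List.getElem?_set_self hlt, Option.getD_some,
        PySem.List.length_pySetD, PySem.List.pyGetD_of_nonneg _ _ hr,
        List.getD_eq_getElem?_getD]
    · have h1 : (out.set r.toNat
          (PySem.List.pySetD (PySem.List.pyGetD out r []) c v)).length ≤ r.toNat := by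
        rw [List.length_set]; omega
      rw [List.getD_eq_getElem?_getD, List.getD_eq_getElem?_getD,
        List.getElem?_eq_none h1, List.getElem?_eq_none (by omega)]
  · rw [List.getD_eq_getElem?_getD, List.getD_eq_getElem?_getD,
      List.getElem?_set_ne (fun hh => hi hh.symm)]

lemma val2_set2d (out : List (List Int)) {r c : Int} (v : Int) (hr : 0 ≤ r) (hc : 0 ≤ c)
    (hrl : r.toNat < out.length) (i j : Nat) :
    val2 (set2d out r c v) i j =
      if i = r.toNat ∧ j = c.toNat then
        (if c.toNat < (out.getD r.toNat []).length then v else val2 out i j)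
      else val2 out i j := by
  have hrow : PySem.List.pySetD (PySem.List.pyGetD out r []) c v =
      (out.getD r.toNat []).set c.toNat v := by
    rw [PySem.List.pySetD_of_nonneg _ _ hc, PySem.List.pyGetD_of_nonneg _ _ hr]
  simp only [val2, List.getD_eq_getElem?_getD, set2d, PySem.List.pySetD_of_nonneg _ _ hr, hrow]
  by_cases hi : i = r.toNat
  · rw [hi, List.getElem?_set_self hrl, Option.getD_some]
    by_cases hj : j = c.toNat
    · rw [hj, if_pos ⟨rfl, rfl⟩]
      by_cases hcl : c.toNat < (out[r.toNat]?.getD []).length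
      · rw [List.getElem?_set_self hcl, Option.getD_some, if_pos hcl]
      · rw [if_neg hcl]
        rw [List.getElem?_eq_none (by rw [List.length_set]; omega), Option.getD_none]
        rw [List.getElem?_eq_none (by omega), Option.getD_none]
    · rw [if_neg (fun hh => hj hh.2)]
      rw [List.getElem?_set_ne (fun hh => hj hh.symm)]
  · rw [List.getElem?_set_ne (fun hh => hi hh.symm), if_neg (fun hh => hi hh.1)]

lemma foldl_set2d_length (L : List (Int × Int)) :
    ∀ (out : List (List Int)),
    (L.foldl (fun o p => set2d o p.1 p.2 3) out).length = out.length := by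
  induction L with
  | nil => intro out; rfl
  | cons p L ih =>
    intro out
    rw [List.foldl_cons, ih, length_set2d]

lemma foldl_set2d_rowlen (L : List (Int × Int)) :
    ∀ (out : List (List Int)), (∀ p ∈ L, 0 ≤ p.1) → ∀ i : Nat,
    ((L.foldl (fun o p => set2d o p.1 p.2 3) out).getD i []).length = (out.getD i []).length := by
  induction L with
  | nil => intro out _ i; rfl
  | cons p L ih =>
    intro out hpos i
    rw [List.foldl_cons, ih _ (fun q hq => hpos q (List.mem_cons_of_mem _ hq)) i,
      rowlen_set2d _ _ _ (hpos p List.mem_cons_self) i]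

lemma foldl_set2d_val (L : List (Int × Int)) :
    ∀ (out : List (List Int)),
    (∀ p ∈ L, 0 ≤ p.1 ∧ 0 ≤ p.2 ∧ p.1.toNat < out.length ∧
      p.2.toNat < (out.getD p.1.toNat []).length) →
    ∀ i j : Nat,
    val2 (L.foldl (fun o p => set2d o p.1 p.2 3) out) i j =
      if ((i : Int), (j : Int)) ∈ L then 3 else val2 out i j := by
  induction L with
  | nil => intro out _ i j; simp
  | cons p L ih =>
    intro out hb i j
    obtain ⟨hp1, hp2, hp3, hp4⟩ := hb p List.mem_cons_self
    have hb' : ∀ q ∈ L, 0 ≤ q.1 ∧ 0 ≤ q.2 ∧ q.1.toNat < (set2d out p.1 p.2 3).length ∧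
        q.2.toNat < ((set2d out p.1 p.2 3).getD q.1.toNat []).length := by
      intro q hq
      obtain ⟨h1, h2, h3, h4⟩ := hb q (List.mem_cons_of_mem _ hq)
      exact ⟨h1, h2, by rw [length_set2d]; exact h3, by rw [rowlen_set2d _ _ _ hp1]; exact h4⟩
    rw [List.foldl_cons, ih _ hb' i j, val2_set2d _ _ hp1 hp2 hp3 i j, if_pos hp4]
    by_cases hmem : ((i : Int), (j : Int)) ∈ L
    · rw [if_pos hmem, if_pos (List.mem_cons_of_mem _ hmem)]
    · rw [if_neg hmem]
      by_cases hp : ((i : Int), (j : Int)) = p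
      · have hij : i = p.1.toNat ∧ j = p.2.toNat := by
          rw [← hp]; simp
        rw [if_pos hij, if_pos (by rw [← hp]; exact List.mem_cons_self)]
      · have hij : ¬(i = p.1.toNat ∧ j = p.2.toNat) := by
          intro ⟨h1, h2⟩
          apply hp
          have : ((i : Int), (j : Int)) = ((p.1.toNat : Int), (p.2.toNat : Int)) := by
            rw [h1, h2]
          rw [this, Int.toNat_of_nonneg hp1, Int.toNat_of_nonneg hp2]
        rw [if_neg hij, if_neg (by simp [List.mem_cons, hp, hmem])]

lemma getD_eq_get {α : Type} (M : List α) (d : α) (i : Nat) (h : i < M.length) :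
    M.getD i d = M[i] := by
  rw [List.getD_eq_getElem?_getD, List.getElem?_eq_getElem h]; rfl

lemma transform_eq (g : List (List Int)) (hpre : Pre_transform g) :
    transform g = transform_alt g := by
  by_cases hemp : g = [] ∨ g.headD [] = []
  · rw [transform, transform_alt, if_pos hemp, if_pos hemp]
  · have hrows : ∀ row ∈ g, (g.headD []).length ≤ row.length := by
      rcases hpre with hh | hh | hh
      · exact absurd (Or.inl hh) hemp
      · exact absurd (Or.inr hh) hemp
      · exact hh
    simp only [transform, transform_alt, if_neg hemp]
    have hs := scan_all g
    simp only [RI, CI] at hs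
    set sA := (PySem.List.pyRange 0 ((g.length : Int)) 1).foldl (fun st r =>
        (PySem.List.pyRange 0 (((g.headD []).length : Int)) 1).foldl (fun st c =>
          scanCell g (g.length : Int) ((g.headD []).length : Int) st r c) st)
        (List.replicate g.length (List.replicate (g.headD []).length false), []) with hsA
    set sB := (PySem.List.pyRange 0 ((g.length : Int)) 1).foldl (fun st r =>
        (PySem.List.pyRange 0 (((g.headD []).length : Int)) 1).foldl (fun st c =>
          scanCellB (zerosOf g (g.length : Int) ((g.headD []).length : Int))
            (((g.length : Int)).toNat * (((g.headD []).length : Int)).toNat + 1) st r c) st)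
        (PySem.Set.empty, PySem.Set.empty) with hsB
    clear_value sA sB
    by_cases hnil : sA.2 = []
    · rw [if_pos hnil]
      have hbl : sB.2 = [] := by
        have hl := hs.llen
        rw [hnil] at hl
        exact List.length_eq_zero_iff.mp hl.symm
      rw [hbl]
      symm
      simp [PySem.List.map_snd_enumerate]
    · rw [if_neg hnil]
      have hpos : ∀ p ∈ sA.2, 0 ≤ p.1 := fun p hp => (hs.lz p hp).1.1
      have hbnd : ∀ p ∈ sA.2, 0 ≤ p.1 ∧ 0 ≤ p.2 ∧ p.1.toNat < g.length ∧
          p.2.toNat < (g.getD p.1.toNat []).length := by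
        intro p hp
        obtain ⟨⟨h1, h2, h3, h4⟩, _⟩ := hs.lz p hp
        have hrl : p.1.toNat < g.length := by simp only [RI] at h2; omega
        refine ⟨h1, h3, hrl, ?_⟩
        have hrowlen := hrows (g[p.1.toNat]) (List.getElem_mem hrl)
        rw [getD_eq_get _ _ _ hrl]
        simp only [CI] at h4
        omega
      apply List.ext_getElem
      · rw [foldl_set2d_length]
        simp [PySem.List.length_enumerate]
      · intro i hi1 hi2
        have hiL : i < g.length := by rw [foldl_set2d_length] at hi1; exact hi1
        apply List.ext_getElem
        · rw [← getD_eq_get _ [] i hi1, foldl_set2d_rowlen _ _ hpos i,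
            getD_eq_get _ [] i hiL]
          simp only [List.getElem_map, PySem.List.getElem_enumerate, List.length_map,
            PySem.List.length_enumerate]
        · intro j hj1 hj2
          have hjg : j < g[i].length := by
            rw [← getD_eq_get _ [] i hi1, foldl_set2d_rowlen _ _ hpos i,
              getD_eq_get _ [] i hiL] at hj1
            exact hj1
          have e1 : (List.foldl (fun out p => set2d out p.1 p.2 3) g sA.2)[i][j] =
              val2 (List.foldl (fun out p => set2d out p.1 p.2 3) g sA.2) i j := by
            rw [val2, getD_eq_get _ [] i hi1, getD_eq_get _ 0 j hj1]
          rw [e1, foldl_set2d_val sA.2 g hbnd i j]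
          simp only [List.getElem_map, PySem.List.getElem_enumerate, zero_add]
          rw [show val2 g i j = g[i][j] from by
            rw [val2, getD_eq_get _ [] i hiL, getD_eq_get _ 0 j hjg]]
          by_cases hmem : ((i : Int), (j : Int)) ∈ sA.2
          · rw [if_pos hmem, if_pos ((hs.lmem _).mp hmem)]
          · rw [if_neg hmem, if_neg (fun hh => hmem ((hs.lmem _).mpr hh))]
-- ===== VERDICT (by name: the statement is the Claim_ definition above) =====
theorem transform_spec : Claim_equal_transform := by
  unfold Claim_equal_transform
  intro g _ hpre
  unfold Spec_transform
  exact transform_eq g hpre
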